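-- pv_equiv track=rewrite | github.com/moelauverjat/python-ivv-tools | app.py | extractTagsOfIssuesfromTitle
-- ===== SOURCE A (Python) =====
-- def extractTagsOfIssuesfromTitle(formatedIssuesList):
--     tagList = set()
--     for issue in formatedIssuesList:
--         # Prevent the possibility to obtain the same tag many time like [Infra] and [infra]
--         # Make all character of the title in lower case
--         lowerTitle = issue['title'].lower()
--         tag = ""
--         captureTag = False
--         # Run through every character of the title one by one
--         for character in lowerTitle:
--
--             # Identify the end of the tag, save the tag in the set
--             if(character == "]"):
--                 captureTag = False
--                 tagList.add(tag)
--                 tag = ""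
--
--             # Save the tag name character by character
--             if(captureTag == True):
--                 tag = tag + character
--
--             # Identify the beginning of a tag
--             if(character == "["):
--                 captureTag = True;
--
--     return tagList
-- ===== SOURCE B (Python) =====
-- def extractTagsOfIssuesfromTitle(formatedIssuesList):
--     tagList = set()
--     for issue in formatedIssuesList:
--         segments = issue['title'].lower().split(']')
--         # every ']' ends a tag; the text after the last ']' never closes, so drop it;
--         # partition leaves '' when the segment has no '[', matching A's empty-tag emissions
--         for segment in segments[:-1]:
--             tagList.add(segment.partition('[')[2])
--     return tagList
-- ===== Notes on version B (the rewrite author's own statement) =====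
-- stated objective: simpler
-- what changed: Replaces A's character-by-character scan with a capture flag and tag accumulator by split-then-partition string operations: split the lowercased title on ']', drop the trailing segment, and for each remaining segment add the part after its first '[' (empty when there is none).
import Mathlib
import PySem

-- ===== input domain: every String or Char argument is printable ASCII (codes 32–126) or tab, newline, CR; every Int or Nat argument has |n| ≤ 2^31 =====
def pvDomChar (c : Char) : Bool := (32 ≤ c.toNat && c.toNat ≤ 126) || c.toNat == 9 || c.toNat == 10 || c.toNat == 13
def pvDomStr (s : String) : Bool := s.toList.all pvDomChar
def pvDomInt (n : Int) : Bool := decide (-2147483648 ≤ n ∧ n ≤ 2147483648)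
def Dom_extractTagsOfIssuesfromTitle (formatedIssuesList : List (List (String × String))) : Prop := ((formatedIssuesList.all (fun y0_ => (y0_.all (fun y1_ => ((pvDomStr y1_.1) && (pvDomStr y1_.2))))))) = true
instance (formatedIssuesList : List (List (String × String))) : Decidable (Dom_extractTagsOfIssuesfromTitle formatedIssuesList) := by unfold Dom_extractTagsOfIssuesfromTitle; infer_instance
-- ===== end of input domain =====

-- B replaces A's per-character capture-flag scan by split-on-']' then take-after-first-'[' per segment (objective: simpler).

-- ===== PORT A =====
-- A's inner loop state: (tagList, tag, captureTag); Python str represented as List Char, tags added as String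
def pvStepA (st : PySem.Set String × List Char × Bool) (ch : Char) : PySem.Set String × List Char × Bool :=
  let (tl, tag, cap) := st
  -- if character == ']' : captureTag = False; tagList.add(tag); tag = ""
  let (tl, tag, cap) := if ch = ']' then (PySem.Set.add tl (String.ofList tag), ([] : List Char), false) else (tl, tag, cap)
  -- if captureTag == True : tag = tag + character
  let tag := if cap then tag ++ [ch] else tag
  -- if character == '[' : captureTag = True
  let cap := if ch = '[' then true else cap
  (tl, tag, cap)

def extractTagsOfIssuesfromTitle (formatedIssuesList : List (List (String × String))) : List String :=
  formatedIssuesList.foldl (fun tagList issue =>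
    match (PySem.Dict.mk issue).get? "title" with
    | none => tagList   -- Python raises KeyError here; excluded by Pre_
    | some title =>
        ((PySem.Chars.lower title.toList).foldl pvStepA (tagList, ([] : List Char), false)).1)
    PySem.Set.empty

-- ===== PORT B =====
-- hand port of segment.partition('[')[2]: everything after the first '[', [] when absent (exact for single-char sep)
def pvAfterLBrack : List Char → List Char
  | [] => []
  | c :: r => if c = '[' then r else pvAfterLBrack r

def extractTagsOfIssuesfromTitle_alt (formatedIssuesList : List (List (String × String))) : List String :=
  formatedIssuesList.foldl (fun tagList issue =>
    match (PySem.Dict.mk issue).get? "title" with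
    | none => tagList   -- Python raises KeyError here; excluded by Pre_
    | some title =>
        ((PySem.Chars.splitOn (PySem.Chars.lower title.toList) [']']).dropLast).foldl
          (fun tl seg => PySem.Set.add tl (String.ofList (pvAfterLBrack seg))) tagList)
    PySem.Set.empty

-- ===== PRECONDITION & SPEC =====
-- Pre_ excludes exactly the issues missing the key 'title', on which Python A raises KeyError (so does B).
def Pre_extractTagsOfIssuesfromTitle (formatedIssuesList : List (List (String × String))) : Prop :=
  ∀ issue ∈ formatedIssuesList, issue.any (fun p => p.1 == "title") = true
instance (formatedIssuesList : List (List (String × String))) : Decidable (Pre_extractTagsOfIssuesfromTitle formatedIssuesList) := by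
  unfold Pre_extractTagsOfIssuesfromTitle; infer_instance

def pvWitness_extractTagsOfIssuesfromTitle : (List (List (String × String))) :=
  [[("title", "[Infra] fix the build")], [("title", "no tag here"), ("state", "open")]]

def Spec_extractTagsOfIssuesfromTitle (formatedIssuesList : List (List (String × String))) (out : List String) : Prop := out = extractTagsOfIssuesfromTitle_alt formatedIssuesList
instance (formatedIssuesList : List (List (String × String))) (out : List String) : Decidable (Spec_extractTagsOfIssuesfromTitle formatedIssuesList out) := by unfold Spec_extractTagsOfIssuesfromTitle; infer_instance

-- ===== CLAIM (what is proved, stated in full; the proofs are below) =====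
def Claim_equal_extractTagsOfIssuesfromTitle : Prop := ∀ (formatedIssuesList : List (List (String × String))), Dom_extractTagsOfIssuesfromTitle formatedIssuesList → Pre_extractTagsOfIssuesfromTitle formatedIssuesList → Spec_extractTagsOfIssuesfromTitle formatedIssuesList (extractTagsOfIssuesfromTitle formatedIssuesList)

-- ===== LEMMAS AND PROOFS =====

-- (terminated segments, trailing segment) of a title split on ']'
def pvSplitT : List Char → List (List Char) × List Char
  | [] => ([], [])
  | c :: r =>
      let (ts, tr) := pvSplitT r
      if c = ']' then ([] :: ts, tr)
      else match ts with
        | [] => ([], c :: tr)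
        | t0 :: ts' => ((c :: t0) :: ts', tr)

def pvSegsOf (chars : List Char) : List (List Char) := (pvSplitT chars).1 ++ [(pvSplitT chars).2]

-- the sequence of tags A's character loop adds, given the incoming (tag, captureTag) state
def pvEmits : List Char → Bool → List Char → List String
  | _, _, [] => []
  | tag, cap, ch :: rest =>
      if ch = ']' then String.ofList tag :: pvEmits [] false rest
      else if cap then pvEmits (tag ++ [ch]) true rest
      else if ch = '[' then pvEmits tag true rest
      else pvEmits tag false rest

theorem pvFoldA_emits (chars : List Char) : ∀ (tl : PySem.Set String) (tag : List Char) (cap : Bool),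
    (chars.foldl pvStepA (tl, tag, cap)).1 = (pvEmits tag cap chars).foldl PySem.Set.add tl := by
  induction chars with
  | nil => intro tl tag cap; simp [pvEmits]
  | cons ch rest ih =>
      intro tl tag cap
      by_cases h1 : ch = ']'
      · simp [pvStepA, pvEmits, h1, ih]
      · by_cases h2 : cap
        · subst h2
          by_cases h3 : ch = '['
          · simp [pvStepA, pvEmits, h1, h3, ih]
          · simp [pvStepA, pvEmits, h1, h3, ih]
        · simp only [Bool.not_eq_true] at h2; subst h2
          by_cases h3 : ch = '['
          · simp [pvStepA, pvEmits, h1, h3, ih]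
          · simp [pvStepA, pvEmits, h1, h3, ih]

theorem pvSegsOf_ne_nil (chars : List Char) : pvSegsOf chars ≠ [] := by
  simp [pvSegsOf]

theorem pvGo_eq (chars : List Char) : ∀ (fuel : Nat) (cur : List Char) (acc : List (List Char)),
    chars.length ≤ fuel →
    PySem.Chars.splitOn.go [']'] fuel chars cur acc
      = acc.reverse ++ (pvSegsOf chars).modifyHead (cur.reverse ++ ·) := by
  induction chars with
  | nil =>
      intro fuel cur acc _
      cases fuel <;> simp [PySem.Chars.splitOn.go, pvSegsOf, pvSplitT]
  | cons c rest ih =>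
      intro fuel cur acc h
      cases fuel with
      | zero => simp at h
      | succ f =>
          rw [PySem.Chars.splitOn.go]
          by_cases hc : c = ']'
          · subst hc
            simp only [List.isPrefixOf, BEq.rfl, Bool.true_and, if_pos, List.length_cons,
              List.length_nil, List.drop_succ_cons, List.drop_zero]
            rw [ih f [] (cur.reverse :: acc) (by simpa using Nat.le_of_succ_le_succ h)]
            simp only [pvSegsOf, pvSplitT, if_pos rfl]
            rcases hs : (pvSplitT rest).1 ++ [(pvSplitT rest).2] with _ | ⟨s0, ss⟩
            · simp at hs
            · simp [hs]
          · have hpre : ([']'].isPrefixOf (c :: rest)) = false := by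
              simp [List.isPrefixOf]; exact fun h' => hc h'.symm
            rw [hpre]
            simp only [Bool.false_eq_true, if_false]
            rw [ih f (c :: cur) acc (by simpa using Nat.le_of_succ_le_succ h)]
            have hseg : pvSegsOf (c :: rest) = (pvSegsOf rest).modifyHead (c :: ·) := by
              simp only [pvSegsOf, pvSplitT, if_neg hc]
              rcases hts : (pvSplitT rest).1 with _ | ⟨t0, ts'⟩ <;> simp [hts]
            rw [hseg]
            rcases hs : pvSegsOf rest with _ | ⟨s0, ss⟩
            · exact absurd hs (pvSegsOf_ne_nil rest)
            · simp

theorem pvSplitOn_eq (chars : List Char) : PySem.Chars.splitOn chars [']'] = pvSegsOf chars := by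
  rw [PySem.Chars.splitOn, pvGo_eq chars (chars.length + 1) [] [] (Nat.le_succ _)]
  rcases hs : pvSegsOf chars with _ | ⟨s0, ss⟩
  · exact absurd hs (pvSegsOf_ne_nil chars)
  · simp

-- both forms of the emitted-tag sequence, simultaneously
theorem pvEmits_spec (chars : List Char) :
    (∀ tag : List Char, pvEmits tag true chars =
      (match (pvSplitT chars).1 with
        | [] => []
        | t0 :: ts => String.ofList (tag ++ t0) :: ts.map (fun s => String.ofList (pvAfterLBrack s)))) ∧
    pvEmits [] false chars = (pvSplitT chars).1.map (fun s => String.ofList (pvAfterLBrack s)) := by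
  induction chars with
  | nil => exact ⟨fun tag => by simp [pvEmits, pvSplitT], by simp [pvEmits, pvSplitT]⟩
  | cons c rest ih =>
      obtain ⟨ihT, ihF⟩ := ih
      constructor
      · intro tag
        by_cases hc : c = ']'
        · subst hc
          simp [pvEmits, pvSplitT, ihF]
        · rw [show pvEmits tag true (c :: rest) = pvEmits (tag ++ [c]) true rest by
              simp [pvEmits, hc]]
          rw [ihT (tag ++ [c])]
          simp only [pvSplitT, if_neg hc]
          rcases hts : (pvSplitT rest).1 with _ | ⟨t0, ts'⟩ <;> simp
      · by_cases hc : c = ']'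
        · subst hc
          simp [pvEmits, pvSplitT, ihF, pvAfterLBrack]
        · by_cases hb : c = '['
          · subst hb
            rw [show pvEmits [] false ('[' :: rest) = pvEmits [] true rest by simp [pvEmits]]
            rw [ihT []]
            simp only [pvSplitT, if_neg (by decide : ('[' : Char) ≠ ']')]
            rcases hts : (pvSplitT rest).1 with _ | ⟨t0, ts'⟩ <;> simp [pvAfterLBrack]
          · rw [show pvEmits [] false (c :: rest) = pvEmits [] false rest by simp [pvEmits, hc, hb]]
            rw [ihF]
            simp only [pvSplitT, if_neg hc]
            rcases hts : (pvSplitT rest).1 with _ | ⟨t0, ts'⟩ <;> simp [pvAfterLBrack, hb]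

theorem pvTitle_eq (title : List Char) (tl : PySem.Set String) :
    (title.foldl pvStepA (tl, ([] : List Char), false)).1
      = ((PySem.Chars.splitOn title [']']).dropLast).foldl
          (fun tl seg => PySem.Set.add tl (String.ofList (pvAfterLBrack seg))) tl := by
  rw [pvFoldA_emits, (pvEmits_spec title).2, pvSplitOn_eq]
  rw [show (pvSegsOf title).dropLast = (pvSplitT title).1 from by simp [pvSegsOf]]
  rw [List.foldl_map]

-- ===== VERDICT (by name: the statement is the Claim_ definition above) =====
theorem extractTagsOfIssuesfromTitle_spec : Claim_equal_extractTagsOfIssuesfromTitle := by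
  intro l _ _
  unfold Spec_extractTagsOfIssuesfromTitle extractTagsOfIssuesfromTitle extractTagsOfIssuesfromTitle_alt
  congr 1
  funext tl issue
  cases (PySem.Dict.mk issue).get? "title" with
  | none => rfl
  | some title => exact pvTitle_eq (PySem.Chars.lower title.toList) tl
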